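-- pv_equiv track=rewrite | github.com/DoYunseo/Leetcode_practice | leetcode_daily(August_2025)/fruits_into_baskets_II/yunseo's_solution.py | unplaced_fruits
-- ===== SOURCE A (Python) =====
-- def unplaced_fruits(fruits, baskets):
--     n = len(fruits)
--     used = [False] * n
--     unplaced_count = 0
--
--     for fruit in fruits:
--         placed = False
--         for i in range(n):
--             if not used[i] and baskets[i] >= fruit:
--                 used[i] = True
--                 placed = True
--                 break
--         if not placed:
--             unplaced_count += 1
--
--     return unplaced_count
-- ===== SOURCE B (Python) =====
-- def unplaced_fruits(fruits, baskets):
--     # Segment tree of max remaining capacities; each fruit descends to the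
--     # leftmost basket with capacity >= fruit, which is then marked used.
--     n = len(fruits)
--     caps = baskets[:n]
--     t = build(caps)
--     unplaced = 0
--     for f in fruits:
--         placed, t = place(t, f)
--         if not placed:
--             unplaced += 1
--     return unplaced
--
--
-- def fits(m, f):
--     return m is not None and m >= f
--
--
-- def omax(a, b):
--     if a is None:
--         return b
--     if b is None:
--         return a
--     return a if b <= a else b
--
--
-- def build(seg):
--     # tree node: (max,) is a leaf holding an Optional capacity;
--     # (max, left, right) is an inner node.
--     if not seg:
--         return (None,)
--     if len(seg) == 1:
--         return (seg[0],)
--     k = len(seg) // 2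
--     left = build(seg[:k])
--     right = build(seg[k:])
--     return (omax(left[0], right[0]), left, right)
--
--
-- def place(t, f):
--     # returns (placed?, updated tree)
--     if len(t) == 1:
--         if fits(t[0], f):
--             return (True, (None,))
--         return (False, t)
--     m, l, r = t
--     if fits(m, f):
--         if fits(l[0], f):
--             _, l2 = place(l, f)
--             return (True, (omax(l2[0], r[0]), l2, r))
--         else:
--             _, r2 = place(r, f)
--             return (True, (omax(l[0], r2[0]), l, r2))
--     return (False, t)
-- ===== Notes on version B (the rewrite author's own statement) =====
-- stated objective: faster
-- what changed: Replaced A's O(n^2) rescans of the used/basket arrays by a segment tree of maximum remaining capacities: each fruit descends from the root to the leftmost basket whose capacity fits, which is then cleared, giving O(n log n).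
import Mathlib
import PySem

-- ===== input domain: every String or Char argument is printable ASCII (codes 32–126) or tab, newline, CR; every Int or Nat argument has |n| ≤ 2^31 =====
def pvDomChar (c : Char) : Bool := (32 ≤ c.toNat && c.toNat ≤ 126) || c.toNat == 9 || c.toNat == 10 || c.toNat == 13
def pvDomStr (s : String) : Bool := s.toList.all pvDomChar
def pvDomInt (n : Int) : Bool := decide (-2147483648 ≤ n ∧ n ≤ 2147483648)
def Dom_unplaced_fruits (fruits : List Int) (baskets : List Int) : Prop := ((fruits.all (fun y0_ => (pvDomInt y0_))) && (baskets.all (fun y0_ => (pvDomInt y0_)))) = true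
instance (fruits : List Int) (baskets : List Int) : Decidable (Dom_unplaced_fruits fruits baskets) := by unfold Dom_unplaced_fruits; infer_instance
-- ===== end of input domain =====

-- B replaces A's quadratic leftmost-fit scan by a segment tree of max capacities (descend to the
-- leftmost basket with capacity >= fruit); measured faster, asymptotically O(n log n) vs O(n^2).

-- ===== PORT A =====
-- inner `for i in range(n): if not used[i] and baskets[i] >= fruit: used[i]=True; placed=True; break`
-- (recursion over the index list; list accesses are in range on every admitted input, default 0/false unreachable there)
def pvAInner (baskets : List Int) (fruit : Int) (used : List Bool) : List Nat → Bool × List Bool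
  | [] => (false, used)
  | i :: rest =>
    if used.getD i false = false ∧ fruit ≤ baskets.getD i 0 then
      (true, used.set i true)
    else pvAInner baskets fruit used rest

def unplaced_fruits (fruits : List Int) (baskets : List Int) : Int :=
  let n := fruits.length
  let st := fruits.foldl (fun (st : List Bool × Int) fruit =>
      let r := pvAInner baskets fruit st.1 (List.range n)
      (r.2, if r.1 then st.2 else st.2 + 1)) (List.replicate n false, 0)
  st.2

-- ===== PORT B =====
-- a tree node is a leaf holding an Optional capacity, or an inner node caching the max below it
inductive PVTree where
  | leaf (c : Option Int)
  | node (m : Option Int) (l r : PVTree)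
deriving Repr

def pvFits (m : Option Int) (f : Int) : Bool :=
  match m with
  | none => false
  | some v => f ≤ v

def pvOmax (a b : Option Int) : Option Int :=
  match a, b with
  | none, b => b
  | a, none => a
  | some a, some b => some (if b ≤ a then a else b)

def pvMx : PVTree → Option Int
  | .leaf c => c
  | .node m _ _ => m

def pvBuild : List Int → PVTree
  | [] => .leaf none
  | [c] => .leaf (some c)
  | a :: b :: rest =>
    let seg := a :: b :: rest
    let k := seg.length / 2
    let left := pvBuild (seg.take k)
    let right := pvBuild (seg.drop k)
    .node (pvOmax (pvMx left) (pvMx right)) left right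
termination_by seg => seg.length
decreasing_by
  · simp [List.length_take]; omega
  · simp [List.length_drop]; omega

def pvPlace : PVTree → Int → Bool × PVTree
  | .leaf c, f => if pvFits c f then (true, .leaf none) else (false, .leaf c)
  | .node m l r, f =>
    if pvFits m f then
      if pvFits (pvMx l) f then
        let l2 := (pvPlace l f).2
        (true, .node (pvOmax (pvMx l2) (pvMx r)) l2 r)
      else
        let r2 := (pvPlace r f).2
        (true, .node (pvOmax (pvMx l) (pvMx r2)) l r2)
    else (false, .node m l r)

def unplaced_fruits_alt (fruits : List Int) (baskets : List Int) : Int :=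
  let n := fruits.length
  let caps := baskets.take n          -- baskets[:n], n ≥ 0
  let st := fruits.foldl (fun (st : PVTree × Int) f =>
      let r := pvPlace st.1 f
      (r.2, if r.1 then st.2 else st.2 + 1)) (pvBuild caps, 0)
  st.2

-- ===== PRECONDITION & SPEC =====
-- A indexes baskets[i] for i in range(len(fruits)); whenever len(baskets) < len(fruits) some fruit
-- fails to place among the real baskets and A raises IndexError, so exactly those inputs are excluded.
def Pre_unplaced_fruits (fruits : List Int) (baskets : List Int) : Prop :=
  fruits.length ≤ baskets.length
instance (fruits : List Int) (baskets : List Int) : Decidable (Pre_unplaced_fruits fruits baskets) := by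
  unfold Pre_unplaced_fruits; infer_instance

def pvWitness_unplaced_fruits : List Int × List Int := ([3, 5, 2], [2, 5, 4])

def Spec_unplaced_fruits (fruits : List Int) (baskets : List Int) (out : Int) : Prop := out = unplaced_fruits_alt fruits baskets
instance (fruits : List Int) (baskets : List Int) (out : Int) : Decidable (Spec_unplaced_fruits fruits baskets out) := by unfold Spec_unplaced_fruits; infer_instance

-- ===== CLAIM (what is proved, stated in full; the proofs are below) =====
def Claim_equal_unplaced_fruits : Prop := ∀ (fruits : List Int) (baskets : List Int), Dom_unplaced_fruits fruits baskets → Pre_unplaced_fruits fruits baskets → Spec_unplaced_fruits fruits baskets (unplaced_fruits fruits baskets)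

-- ===== LEMMAS AND PROOFS =====

-- the leaves of a tree, in order (some c = available capacity c, none = used slot)
def pvLeaves : PVTree → List (Option Int)
  | .leaf c => [c]
  | .node _ l r => pvLeaves l ++ pvLeaves r

-- well-formed: every cached max really is the max of the two children's maxes
def pvWF : PVTree → Prop
  | .leaf _ => True
  | .node m l r => m = pvOmax (pvMx l) (pvMx r) ∧ pvWF l ∧ pvWF r

def pvOmaxList (xs : List (Option Int)) : Option Int := xs.foldr pvOmax none

-- reference: replace the first available leaf with capacity ≥ f by none (A's leftmost-fit scan)
def pvFirstFit (f : Int) : List (Option Int) → Option (List (Option Int))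
  | [] => none
  | x :: rest =>
    if pvFits x f then some (none :: rest)
    else (pvFirstFit f rest).map (fun r => x :: r)

-- the masked view of A's state: none where used, some capacity otherwise
def pvMask : List Bool → List Int → List (Option Int)
  | u :: us, c :: cs => (if u then none else some c) :: pvMask us cs
  | _, _ => []

theorem pvFirstFit_append (f : Int) (a b : List (Option Int)) :
    pvFirstFit f (a ++ b) =
      match pvFirstFit f a with
      | some r => some (r ++ b)
      | none => (pvFirstFit f b).map (fun r => a ++ r) := by
  induction a with
  | nil => simp [pvFirstFit]
  | cons x xs ih =>
    by_cases hx : pvFits x f = true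
    · simp [pvFirstFit, hx]
    · simp only [List.cons_append, pvFirstFit, hx, if_false, ih]
      cases pvFirstFit f xs <;> cases pvFirstFit f b <;> simp

theorem pvMask_length (us : List Bool) (cs : List Int) :
    (pvMask us cs).length = min us.length cs.length := by
  induction us generalizing cs with
  | nil => simp [pvMask]
  | cons u us ih => cases cs <;> simp [pvMask, ih] <;> omega

theorem pvMask_getElem (us : List Bool) (cs : List Int) (k : Nat)
    (h : k < (pvMask us cs).length) (h1 : k < us.length) (h2 : k < cs.length) :
    (pvMask us cs)[k] = if us[k] then none else some cs[k] := by
  induction k generalizing us cs with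
  | zero => cases us with
    | nil => simp at h1
    | cons u us => cases cs with
      | nil => simp at h2
      | cons c cs => simp [pvMask]
  | succ k ih =>
    cases us with
    | nil => simp at h1
    | cons u us => cases cs with
      | nil => simp at h2
      | cons c cs =>
        simp only [pvMask, List.getElem_cons_succ]
        exact ih us cs (by simpa [pvMask] using h) (by simpa using h1) (by simpa using h2)

theorem pvMask_set_none (us : List Bool) (cs : List Int) (k : Nat) :
    pvMask (us.set k true) cs = (pvMask us cs).set k none := by
  induction k generalizing us cs with
  | zero => cases us with
    | nil => simp [pvMask]
    | cons u us => cases cs <;> simp [pvMask]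
  | succ k ih =>
    cases us with
    | nil => simp [pvMask]
    | cons u us => cases cs with
      | nil => simp [pvMask]
      | cons c cs => simp [pvMask, ih]

theorem pvMask_replicate (cs : List Int) :
    pvMask (List.replicate cs.length false) cs = cs.map some := by
  induction cs with
  | nil => simp [pvMask]
  | cons c cs ih => simpa [pvMask, List.replicate_succ] using ih

-- pvFits distributes over the cached max
theorem pvFits_omax (a b : Option Int) (f : Int) :
    pvFits (pvOmax a b) f = (pvFits a f || pvFits b f) := by
  cases a <;> cases b <;> simp [pvOmax, pvFits] <;> split <;> simp_all <;> omega

-- place on a tree whose max does not fit: nothing found, tree unchanged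
theorem pvPlace_none (t : PVTree) (f : Int) (hw : pvWF t) (h : pvFits (pvMx t) f = false) :
    pvPlace t f = (false, t) ∧ pvFirstFit f (pvLeaves t) = none := by
  induction t with
  | leaf c => simp [pvPlace, pvLeaves, pvMx] at *; simp [h, pvFirstFit]
  | node m l r ihl ihr =>
    obtain ⟨hm, hwl, hwr⟩ := hw
    simp only [pvMx] at h
    have h' := h
    rw [hm, pvFits_omax] at h'
    simp only [Bool.or_eq_false_iff] at h'
    obtain ⟨hl, hr⟩ := h'
    obtain ⟨-, hfl⟩ := ihl hwl hl
    obtain ⟨-, hfr⟩ := ihr hwr hr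
    refine ⟨by simp [pvPlace, h], ?_⟩
    simp [pvLeaves, pvFirstFit_append, hfl, hfr]

-- place on a tree whose max fits: removes exactly the leftmost fitting leaf
theorem pvPlace_some (t : PVTree) (f : Int) (hw : pvWF t) (h : pvFits (pvMx t) f = true) :
    (pvPlace t f).1 = true ∧
      pvFirstFit f (pvLeaves t) = some (pvLeaves (pvPlace t f).2) ∧ pvWF (pvPlace t f).2 := by
  induction t with
  | leaf c => simp only [pvMx] at h; simp [pvPlace, h, pvLeaves, pvFirstFit, pvWF]
  | node m l r ihl ihr =>
    obtain ⟨hm, hwl, hwr⟩ := hw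
    simp only [pvMx] at h
    have hfit : pvFits m f = true := h
    by_cases hl : pvFits (pvMx l) f = true
    · obtain ⟨h1, h2, h3⟩ := ihl hwl hl
      refine ⟨by simp [pvPlace, hfit, hl], ?_, ?_⟩
      · simp [pvPlace, hfit, hl, pvLeaves, pvFirstFit_append, h2]
      · simp [pvPlace, hfit, hl, pvWF, h3, hwr]
    · have hl' : pvFits (pvMx l) f = false := by simpa using hl
      have hr : pvFits (pvMx r) f = true := by
        have h2 := h
        rw [hm, pvFits_omax, hl'] at h2; simpa using h2
      obtain ⟨hpl, hfl⟩ := pvPlace_none l f hwl hl'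
      obtain ⟨h1, h2, h3⟩ := ihr hwr hr
      refine ⟨by simp [pvPlace, hfit, hl'], ?_, ?_⟩
      · simp [pvPlace, hfit, hl', pvLeaves, pvFirstFit_append, hfl, h2]
      · simp [pvPlace, hfit, hl', pvWF, h3, hwl]

-- building from a nonempty list: leaves are the capacities, tree is well-formed
theorem pvBuild_spec (l : List Int) :
    (l ≠ [] → pvLeaves (pvBuild l) = l.map some) ∧ pvWF (pvBuild l) := by
  induction l using pvBuild.induct with
  | case1 => exact ⟨fun h => absurd rfl h, by rw [pvBuild]; simp [pvWF]⟩
  | case2 c => exact ⟨fun _ => by simp [pvBuild, pvLeaves], by rw [pvBuild]; simp [pvWF]⟩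
  | case3 a b rest seg k ih1 ih2 =>
    have hk1 : 1 ≤ (a :: b :: rest).length / 2 := by simp; omega
    have hk2 : (a :: b :: rest).length / 2 < (a :: b :: rest).length := by simp; omega
    have htne : (a :: b :: rest).take ((a :: b :: rest).length / 2) ≠ [] := by
      apply List.ne_nil_of_length_pos; simp
    have hdne : (a :: b :: rest).drop ((a :: b :: rest).length / 2) ≠ [] := by
      apply List.ne_nil_of_length_pos; simp; omega
    obtain ⟨e1, w1⟩ := ih1
    obtain ⟨e2, w2⟩ := ih2
    simp only [k, seg] at e1 e2 w1 w2
    rw [pvBuild]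
    refine ⟨fun _ => ?_, rfl, w1, w2⟩
    simp only [pvLeaves, e1 htne, e2 hdne, ← List.map_append, List.take_append_drop]

-- A's inner scan from index k computes exactly pvFirstFit on the masked suffix
theorem pvAInner_spec (f : Int) (baskets : List Int) (n : Nat) (hn : n ≤ baskets.length) :
    ∀ (m k : Nat) (used : List Bool), k + m = n → used.length = n →
    (pvFirstFit f ((pvMask used (baskets.take n)).drop k) = none →
        pvAInner baskets f used (List.range' k m) = (false, used)) ∧
    (∀ r, pvFirstFit f ((pvMask used (baskets.take n)).drop k) = some r →
        ∃ used', pvAInner baskets f used (List.range' k m) = (true, used') ∧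
          used'.length = n ∧
          pvMask used' (baskets.take n) = (pvMask used (baskets.take n)).take k ++ r) := by
  intro m
  induction m with
  | zero =>
    intro k used hk hu
    have hM : (pvMask used (baskets.take n)).length = n := by
      rw [pvMask_length]; simp [hu]; omega
    have hdrop : (pvMask used (baskets.take n)).drop k = [] := by
      apply List.drop_eq_nil_of_le; omega
    rw [hdrop]
    exact ⟨fun _ => rfl, fun r hr => by simp [pvFirstFit] at hr⟩
  | succ m ih =>
    intro k used hk hu
    have hkn : k < n := by omega
    have hM : (pvMask used (baskets.take n)).length = n := by
      rw [pvMask_length]; simp [hu]; omega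
    have hkM : k < (pvMask used (baskets.take n)).length := by omega
    have hku : k < used.length := by omega
    have hkb : k < baskets.length := by omega
    have hkt : k < (baskets.take n).length := by simp; omega
    have hdrop : (pvMask used (baskets.take n)).drop k =
        (pvMask used (baskets.take n))[k] :: (pvMask used (baskets.take n)).drop (k+1) :=
      List.drop_eq_getElem_cons hkM
    have hMk : (pvMask used (baskets.take n))[k] =
        if used[k] then none else some baskets[k] := by
      rw [pvMask_getElem used (baskets.take n) k hkM hku hkt]
      simp [List.getElem_take]
    have hgu : used.getD k false = used[k] := List.getD_eq_getElem used false hku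
    have hgb : baskets.getD k 0 = baskets[k] := List.getD_eq_getElem baskets 0 hkb
    have hrange : List.range' k (m+1) = k :: List.range' (k+1) m := List.range'_succ
    by_cases hc : used[k] = false ∧ f ≤ baskets[k]
    · -- fruit fits at index k
      have hstep : pvAInner baskets f used (List.range' k (m+1)) = (true, used.set k true) := by
        rw [hrange]
        simp only [pvAInner]
        rw [hgu, hgb, if_pos ⟨hc.1, hc.2⟩]
      have hfitk : pvFits (pvMask used (baskets.take n))[k] f = true := by
        rw [hMk, hc.1]; simp [pvFits, hc.2]
      have hff : pvFirstFit f ((pvMask used (baskets.take n)).drop k) =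
          some (none :: (pvMask used (baskets.take n)).drop (k+1)) := by
        rw [hdrop]; simp [pvFirstFit, hfitk]
      refine ⟨fun hnone => by rw [hff] at hnone; exact absurd hnone (by simp), ?_⟩
      intro r hr
      rw [hff] at hr
      obtain rfl : none :: (pvMask used (baskets.take n)).drop (k+1) = r := by
        injection hr
      refine ⟨used.set k true, hstep, by simpa using hu, ?_⟩
      rw [pvMask_set_none, List.set_eq_take_append_cons_drop, if_pos hkM]
    · -- no fit at index k: scan continues
      have hnofit : pvFits (pvMask used (baskets.take n))[k] f = false := by
        rw [hMk]
        by_cases h : used[k] = true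
        · simp [h, pvFits]
        · have h' : used[k] = false := by simpa using h
          have hlt : ¬ f ≤ baskets[k] := fun hh => hc ⟨h', hh⟩
          simp [h', pvFits]
          omega
      have hstep : pvAInner baskets f used (List.range' k (m+1)) =
          pvAInner baskets f used (List.range' (k+1) m) := by
        rw [hrange]
        simp only [pvAInner]
        rw [hgu, hgb, if_neg hc]
      have hff : pvFirstFit f ((pvMask used (baskets.take n)).drop k) =
          (pvFirstFit f ((pvMask used (baskets.take n)).drop (k+1))).map
            (fun r => (pvMask used (baskets.take n))[k] :: r) := by
        rw [hdrop]; simp [pvFirstFit, hnofit]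
      obtain ⟨ih1, ih2⟩ := ih (k+1) used (by omega) hu
      constructor
      · intro hnone
        rw [hff] at hnone
        rw [hstep]
        exact ih1 (by simpa using hnone)
      · intro r hr
        rw [hff] at hr
        rcases Option.map_eq_some_iff.mp hr with ⟨r', hr', rfl⟩
        obtain ⟨used', h1, h2, h3⟩ := ih2 r' hr'
        refine ⟨used', by rw [hstep]; exact h1, h2, ?_⟩
        have : (pvMask used (baskets.take n)).take (k+1) =
            (pvMask used (baskets.take n)).take k ++ [(pvMask used (baskets.take n))[k]] := by
          rw [List.take_succ]; simp [List.getElem?_eq_getElem hkM]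
        rw [h3, this, List.append_assoc]
        rfl

-- the two folds march in lockstep: A's used-mask is exactly B's leaf list
theorem pvOuter (baskets : List Int) (n : Nat) (hn : n ≤ baskets.length) :
    ∀ (fs : List Int) (used : List Bool) (t : PVTree) (c : Int),
      used.length = n → pvWF t → pvLeaves t = pvMask used (baskets.take n) →
      (fs.foldl (fun (st : List Bool × Int) fruit =>
          let r := pvAInner baskets fruit st.1 (List.range n)
          (r.2, if r.1 then st.2 else st.2 + 1)) (used, c)).2 =
      (fs.foldl (fun (st : PVTree × Int) f =>
          let r := pvPlace st.1 f
          (r.2, if r.1 then st.2 else st.2 + 1)) (t, c)).2 := by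
  intro fs
  induction fs with
  | nil => intro used t c _ _ _; rfl
  | cons f fs ihf =>
    intro used t c hu hw hl
    obtain ⟨s1, s2⟩ := pvAInner_spec f baskets n hn n 0 used (by omega) hu
    simp only [List.drop_zero] at s1 s2
    have hrange : List.range n = List.range' 0 n := List.range_eq_range'
    simp only [List.foldl_cons]
    cases hff : pvFirstFit f (pvMask used (baskets.take n)) with
    | none =>
      have hA := s1 hff
      have hBfit : pvFits (pvMx t) f = false := by
        cases h : pvFits (pvMx t) f with
        | false => rfl
        | true =>
          obtain ⟨-, h2, -⟩ := pvPlace_some t f hw h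
          rw [hl, hff] at h2; exact absurd h2 (by simp)
      obtain ⟨hB, -⟩ := pvPlace_none t f hw hBfit
      rw [hrange] at ihf ⊢
      simp only [hA, hB]
      exact ihf used t (c + 1) hu hw hl
    | some r =>
      obtain ⟨used', h1, h2, h3⟩ := s2 r hff
      simp only [List.take_zero, List.nil_append] at h3
      have hBfit : pvFits (pvMx t) f = true := by
        cases h : pvFits (pvMx t) f with
        | true => rfl
        | false =>
          obtain ⟨-, hnone⟩ := pvPlace_none t f hw h
          rw [hl, hff] at hnone; exact absurd hnone (by simp)
      obtain ⟨hB1, hB2, hB3⟩ := pvPlace_some t f hw hBfit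
      rw [hl, hff] at hB2
      have hleq : pvLeaves (pvPlace t f).2 = pvMask used' (baskets.take n) := by
        injection hB2 with hB2; rw [← hB2, h3]
      rw [hrange] at ihf ⊢
      simp only [h1, hB1]
      exact ihf used' (pvPlace t f).2 c (by omega) hB3 hleq


-- ===== VERDICT (by name: the statement is the Claim_ definition above) =====
theorem unplaced_fruits_spec : Claim_equal_unplaced_fruits := by
  intro fruits baskets _ hpre
  unfold Spec_unplaced_fruits unplaced_fruits unplaced_fruits_alt
  unfold Pre_unplaced_fruits at hpre
  cases fruits with
  | nil => rfl
  | cons f0 fr =>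
    have hcne : baskets.take (f0 :: fr).length ≠ [] := by
      apply List.ne_nil_of_length_pos
      simp only [List.length_take, List.length_cons, lt_min_iff]
      constructor
      · omega
      · simp only [List.length_cons] at hpre; omega
    obtain ⟨hleaves, hwf⟩ := pvBuild_spec (baskets.take (f0 :: fr).length)
    have hclen : (baskets.take (f0 :: fr).length).length = (f0 :: fr).length := by
      simp only [List.length_take, List.length_cons] at hpre ⊢
      omega
    have hrep := pvMask_replicate (baskets.take (f0 :: fr).length)
    rw [hclen] at hrep
    have hinv : pvLeaves (pvBuild (baskets.take (f0 :: fr).length)) =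
        pvMask (List.replicate (f0 :: fr).length false) (baskets.take (f0 :: fr).length) := by
      rw [hleaves hcne, ← hrep]
    exact pvOuter baskets (f0 :: fr).length hpre (f0 :: fr)
      (List.replicate (f0 :: fr).length false) _ 0 (by simp) hwf hinv
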